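-- pv_equiv track=rewrite | github.com/limbero/aoc_2023 | 7/solver_second.py | onepair
-- ===== SOURCE A (Python) =====
-- def buildoccurencedict(hand):
--   occurencedict = {}
--   for card in hand:
--     if card in occurencedict:
--       occurencedict[card] += 1
--     else:
--       occurencedict[card] = 1
--   return occurencedict
--
-- def onepair(hand):
--   if len(hand) < 2:
--     return False
--   occurencedict = buildoccurencedict(hand)
--   onepairalready = False
--   for occkey in occurencedict:
--     if occurencedict[occkey] == 2:
--       if onepairalready:
--         return False
--       onepairalready = True
--   return onepairalready
-- ===== SOURCE B (Python) =====
-- def onepair(hand):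
--     def count_pair_runs(s):
--         if not s:
--             return 0
--         run = 1
--         while run < len(s) and s[run] == s[0]:
--             run += 1
--         return (1 if run == 2 else 0) + count_pair_runs(s[run:])
--     return count_pair_runs(sorted(hand)) == 1
-- ===== Notes on version B (the rewrite author's own statement) =====
-- stated objective: alternative
-- what changed: Replaced the occurrence-dictionary build plus flag-carrying key scan by sort-then-scan: sort the hand and walk consecutive runs of equal cards, counting runs of length exactly 2 and comparing that count to 1; the redundant len<2 guard is dropped.
import Mathlib
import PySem

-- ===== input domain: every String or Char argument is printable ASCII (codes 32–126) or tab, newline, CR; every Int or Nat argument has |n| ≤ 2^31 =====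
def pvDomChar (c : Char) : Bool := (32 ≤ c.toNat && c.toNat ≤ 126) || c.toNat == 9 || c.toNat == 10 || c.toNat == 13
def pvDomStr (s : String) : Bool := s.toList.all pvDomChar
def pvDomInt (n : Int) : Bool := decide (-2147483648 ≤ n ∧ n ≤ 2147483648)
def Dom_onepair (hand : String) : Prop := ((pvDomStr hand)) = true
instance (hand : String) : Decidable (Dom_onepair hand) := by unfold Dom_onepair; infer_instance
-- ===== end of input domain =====

-- B replaces A's occurrence-dictionary + flag-carrying key scan by sort-then-scan over runs of equal cards (alternative decomposition; no speed claim).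

-- ===== PORT A =====
def buildoccurencedict (hand : List Char) : PySem.Dict Char Int :=
  hand.foldl (fun d card =>
    if d.contains card then d.insert card (d.getD card 0 + 1)
    else d.insert card 1) PySem.Dict.empty

-- 'for occkey in occurencedict: …' with the early 'return False' and the onepairalready flag
def onepairLoop (d : PySem.Dict Char Int) : List Char → Bool → Bool
  | [], flag => flag
  | k :: ks, flag =>
    if d.getD k 0 == 2 then
      (if flag then false else onepairLoop d ks true)
    else onepairLoop d ks flag

def onepair (hand : String) : Bool :=
  if PySem.Str.len hand < 2 then false
  else
    let d := buildoccurencedict hand.toList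
    onepairLoop d d.keys false

-- ===== PORT B =====
-- count_pair_runs: run = 1 + the equal prefix of the tail, recurse on the rest (s[run:])
def countPairRuns : List Char → Nat
  | [] => 0
  | c :: rest =>
    let run := 1 + (rest.takeWhile (fun x => x == c)).length
    (if run == 2 then 1 else 0) + countPairRuns (rest.dropWhile (fun x => x == c))
termination_by s => s.length
decreasing_by
  simp only [List.length_cons]
  exact Nat.lt_succ_of_le (List.length_dropWhile_le _ _)

def onepair_alt (hand : String) : Bool :=
  countPairRuns (PySem.List.sorted hand.toList (fun c => c) false) == 1

-- ===== PRECONDITION & SPEC =====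
def Spec_onepair (hand : String) (out : Bool) : Prop := out = onepair_alt hand
instance (hand : String) (out : Bool) : Decidable (Spec_onepair hand out) := by unfold Spec_onepair; infer_instance

-- ===== CLAIM (what is proved, stated in full; the proofs are below) =====
def Claim_equal_onepair : Prop := ∀ (hand : String), Dom_onepair hand → Spec_onepair hand (onepair hand)

-- ===== LEMMAS AND PROOFS =====

-- A's dict build is Counter(hand)
lemma build_eq_counter (xs : List Char) : buildoccurencedict xs = PySem.Dict.counter xs := by
  rw [← PySem.Dict.foldl_insert_getD_add_one_eq_counter]
  unfold buildoccurencedict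
  have hstep : (fun (d : PySem.Dict Char Int) card =>
      if d.contains card then d.insert card (d.getD card 0 + 1) else d.insert card 1)
      = (fun (d : PySem.Dict Char Int) x => d.insert x (d.getD x 0 + 1)) := by
    funext d c
    by_cases h : d.contains c
    · simp [h]
    · have h' : d.get? c = none := by
        simpa [PySem.Dict.contains_eq_isSome_get?] using h
      simp [h, PySem.Dict.getD, h']
  rw [hstep]

-- A's flag loop counts the keys whose occurrence is exactly 2
lemma onepairLoop_spec (d : PySem.Dict Char Int) (ks : List Char) (flag : Bool) :
    onepairLoop d ks flag =
      (if flag then ks.countP (fun k => d.getD k 0 == 2) == 0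
       else ks.countP (fun k => d.getD k 0 == 2) == 1) := by
  induction ks generalizing flag with
  | nil => cases flag <;> simp [onepairLoop]
  | cons k ks ih =>
    simp only [onepairLoop, List.countP_cons]
    by_cases hk : (d.getD k 0 == 2) = true
    · cases flag <;> simp [hk, ih]
    · cases flag <;> simp [hk, ih]

lemma not_mem_dropWhile_beq (c : Char) (l : List Char) (hp : l.Pairwise (· ≤ ·))
    (hb : ∀ x ∈ l, c ≤ x) : c ∉ l.dropWhile (fun x => x == c) := by
  induction l with
  | nil => simp
  | cons a l ih =>
    rcases List.pairwise_cons.mp hp with ⟨ha, hp'⟩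
    by_cases h : a = c
    · subst h
      simp only [List.dropWhile_cons, beq_self_eq_true]
      exact ih hp' (fun x hx => hb x (List.mem_cons_of_mem _ hx))
    · simp only [List.dropWhile_cons, beq_iff_eq, if_neg h]
      intro hc
      rcases List.mem_cons.mp hc with rfl | hc
      · exact h rfl
      · exact h (le_antisymm (ha c hc) (hb a (List.mem_cons_self)))

-- B's run scan on a sorted list counts the distinct elements occurring exactly twice
lemma countPairRuns_spec (s : List Char) (hs : s.Pairwise (· ≤ ·)) :
    countPairRuns s = (PySem.List.dedup s).countP (fun c => s.count c == 2) := by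
  induction s using countPairRuns.induct with
  | case1 => simp [countPairRuns]
  | case2 c rest ih =>
    rcases List.pairwise_cons.mp hs with ⟨hcle, hrest⟩
    set t := rest.takeWhile (fun x => x == c) with ht
    set dd := rest.dropWhile (fun x => x == c) with hdd
    have hsplit : t ++ dd = rest := List.takeWhile_append_dropWhile
    have htc : ∀ x ∈ t, x = c := by
      intro x hx
      have := List.mem_takeWhile_imp (p := fun y => y == c) hx
      simpa using this
    have hcdd : c ∉ dd := not_mem_dropWhile_beq c rest hrest hcle
    have hddp : dd.Pairwise (· ≤ ·) := List.Pairwise.sublist (List.dropWhile_sublist _) hrest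
    have hcount_c : (c :: rest).count c = 1 + t.length := by
      rw [List.count_cons_self, ← hsplit, List.count_append]
      have h1 : t.count c = t.length := by
        rw [List.count_eq_length]
        intro b hb
        simp [htc b hb]
      have h2 : dd.count c = 0 := List.count_eq_zero.mpr hcdd
      omega
    have hcount_ne : ∀ x, x ≠ c → (c :: rest).count x = dd.count x := by
      intro x hx
      have ht0 : t.count x = 0 := List.count_eq_zero.mpr (fun hmem => hx (htc x hmem))
      simp [← hsplit, List.count_append, ht0, Ne.symm hx]
    have hperm : (PySem.List.dedup (c :: rest)).Perm (c :: PySem.List.dedup dd) := by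
      rw [List.perm_ext_iff_of_nodup (PySem.List.nodup_dedup _)
        (List.nodup_cons.mpr ⟨fun h => hcdd ((PySem.List.mem_dedup dd c).mp h), PySem.List.nodup_dedup _⟩)]
      intro x
      simp only [PySem.List.mem_dedup, List.mem_cons]
      constructor
      · rintro (rfl | hx)
        · exact Or.inl rfl
        · rw [← hsplit] at hx
          rcases List.mem_append.mp hx with hx | hx
          · exact Or.inl (htc x hx)
          · exact Or.inr hx
      · rintro (rfl | hx)
        · exact Or.inl rfl
        · exact Or.inr (by rw [← hsplit]; exact List.mem_append.mpr (Or.inr hx))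
    have hunf : countPairRuns (c :: rest) = (if 1 + t.length == 2 then 1 else 0) + countPairRuns dd :=
      countPairRuns.eq_2 c rest
    rw [hunf]
    rw [hperm.countP_eq, List.countP_cons]
    have hinner : (PySem.List.dedup dd).countP (fun x => (c :: rest).count x == 2)
        = (PySem.List.dedup dd).countP (fun x => dd.count x == 2) := by
      apply List.countP_congr
      intro x hx
      have hxdd : x ∈ dd := (PySem.List.mem_dedup dd x).mp hx
      have hxc : x ≠ c := fun h => hcdd (h ▸ hxdd)
      rw [hcount_ne x hxc]
    rw [hinner, ← ih hddp, hcount_c]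
    by_cases h2 : 1 + t.length = 2 <;> simp [h2] <;> omega

-- ===== VERDICT (by name: the statement is the Claim_ definition above) =====
theorem onepair_spec : Claim_equal_onepair := by
  intro hand _
  unfold Spec_onepair onepair onepair_alt
  set xs := hand.toList with hx
  have hlen : PySem.Str.len hand = (xs.length : Int) := by
    rw [PySem.Str.len_eq]
  have hsorted : (PySem.List.sorted xs (fun c => c) false).Pairwise (· ≤ ·) :=
    PySem.List.sorted_pairwise xs (fun c => c)
  have hperm : (PySem.List.sorted xs (fun c => c) false).Perm xs := PySem.List.sorted_perm xs _ false
  have hB : countPairRuns (PySem.List.sorted xs (fun c => c) false)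
      = (PySem.List.dedup xs).countP (fun c => xs.count c == 2) := by
    rw [countPairRuns_spec _ hsorted]
    have hdperm : (PySem.List.dedup (PySem.List.sorted xs (fun c => c) false)).Perm (PySem.List.dedup xs) := by
      rw [List.perm_ext_iff_of_nodup (PySem.List.nodup_dedup _) (PySem.List.nodup_dedup _)]
      intro a
      simp [hperm.mem_iff]
    rw [hdperm.countP_eq]
    apply List.countP_congr
    intro x _
    rw [hperm.count_eq]
  split_ifs with h
  · rw [hlen] at h
    have hl2 : xs.length < 2 := by exact_mod_cast h
    have h0 : (PySem.List.dedup xs).countP (fun c => xs.count c == 2) = 0 := by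
      apply List.countP_eq_zero.mpr
      intro c _ hc
      have hle := List.count_le_length (a := c) (l := xs)
      simp only [beq_iff_eq] at hc
      omega
    rw [hB, h0]
    rfl
  · rw [build_eq_counter]
    show onepairLoop (PySem.Dict.counter xs) (PySem.Dict.counter xs).keys false = _
    rw [PySem.Dict.keys_counter, onepairLoop_spec, if_neg (by simp), hB,
      ← PySem.List.dedup_eq_ofList]
    have hcp : (PySem.List.dedup xs).countP (fun k => PySem.Dict.getD (PySem.Dict.counter xs) k 0 == 2)
        = (PySem.List.dedup xs).countP (fun c => xs.count c == 2) := by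
      apply List.countP_congr
      intro x _
      rw [PySem.Dict.getD_counter]
      constructor
      · intro hx2
        simp only [beq_iff_eq] at hx2 ⊢
        exact_mod_cast hx2
      · intro hx2
        simp only [beq_iff_eq] at hx2 ⊢
        exact_mod_cast hx2
    rw [hcp]
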